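-- pv_equiv track=rewrite | github.com/travisCxy/deblur | att_model_2.2/projects/ch/common.py | ignore_hw
-- ===== SOURCE A (Python) =====
-- def ignore_hw(s):
--     ret = ""
--     ignore = False
--     for c in s:
--         if c == '$':
--             ignore = not ignore
--             continue
--         else:
--             if not ignore:
--                 ret += c
--     return ret
-- ===== SOURCE B (Python) =====
-- def ignore_hw(s):
--     return "".join(s.split('$')[::2])
-- ===== Notes on version B (the rewrite author's own statement) =====
-- stated objective: simpler
-- what changed: Replaces the per-character toggle state machine with split on the marker character, keeping every other segment ([::2]) and joining them.
import Mathlib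
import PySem

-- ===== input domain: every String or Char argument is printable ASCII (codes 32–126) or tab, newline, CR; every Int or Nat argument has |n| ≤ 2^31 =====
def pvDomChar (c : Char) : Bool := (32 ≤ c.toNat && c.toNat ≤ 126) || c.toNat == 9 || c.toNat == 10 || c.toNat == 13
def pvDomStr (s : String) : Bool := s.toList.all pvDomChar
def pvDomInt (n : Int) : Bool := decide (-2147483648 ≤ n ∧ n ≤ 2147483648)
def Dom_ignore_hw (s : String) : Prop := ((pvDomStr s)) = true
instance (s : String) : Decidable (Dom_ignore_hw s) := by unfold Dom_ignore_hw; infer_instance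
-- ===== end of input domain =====

-- B replaces A's per-character toggle state machine by split-on-'$' / keep-even-segments / join (simpler, one pass of library calls).

-- ===== PORT A =====
-- literal transliteration: ret accumulated as a list of chars (Python's ret += c), ignore flag toggled on '$'
def ignore_hw (s : String) : String :=
  let r := s.toList.foldl
    (fun (st : List Char × Bool) c =>
      if c = '$' then (st.1, !st.2)
      else if !st.2 then (st.1 ++ [c], st.2) else st)
    ([], false)
  String.ofList r.1

-- ===== PORT B =====
-- "".join(s.split('$')[::2])
def ignore_hw_alt (s : String) : String :=
  match PySem.List.slice? (PySem.Chars.splitOn s.toList ['$']) none none 2 with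
  | some parts => String.ofList (PySem.Chars.join [] parts)
  | none => ""

-- ===== PRECONDITION & SPEC =====
def Spec_ignore_hw (s : String) (out : String) : Prop := out = ignore_hw_alt s
instance (s : String) (out : String) : Decidable (Spec_ignore_hw s out) := by unfold Spec_ignore_hw; infer_instance

-- ===== CLAIM (what is proved, stated in full; the proofs are below) =====
def Claim_equal_ignore_hw : Prop := ∀ (s : String), Dom_ignore_hw s → Spec_ignore_hw s (ignore_hw s)

-- ===== LEMMAS AND PROOFS =====

-- chars kept by A's state machine, as a plain recursion
def keepAux : List Char → Bool → List Char
  | [], _ => []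
  | c :: rest, ig =>
      if c = '$' then keepAux rest (!ig)
      else if !ig then c :: keepAux rest ig else keepAux rest ig

-- split on '$', as a plain recursion
def splitRec : List Char → List (List Char)
  | [] => [[]]
  | c :: rest => if c = '$' then [] :: splitRec rest
                 else (splitRec rest).modifyHead (c :: ·)

-- every other element, starting with the first
def evens {α : Type} : List α → List α
  | [] => []
  | [x] => [x]
  | x :: _ :: xs => x :: evens xs

theorem evens_cons {α : Type} (x : α) (xs : List α) :
    evens (x :: xs) = x :: evens xs.tail := by
  cases xs <;> simp [evens]

theorem splitRec_ne_nil (l : List Char) : splitRec l ≠ [] := by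
  cases l with
  | nil => simp [splitRec]
  | cons c rest =>
      simp only [splitRec]
      split
      · simp
      · cases h : splitRec rest with
        | nil => exact absurd h (splitRec_ne_nil rest)
        | cons a as => simp

theorem foldlA (l : List Char) (acc : List Char) (ig : Bool) :
    (l.foldl (fun (st : List Char × Bool) c =>
      if c = '$' then (st.1, !st.2)
      else if !st.2 then (st.1 ++ [c], st.2) else st) (acc, ig)).1
    = acc ++ keepAux l ig := by
  induction l generalizing acc ig with
  | nil => simp [keepAux]
  | cons c rest ih =>
      rw [List.foldl_cons]
      beta_reduce
      by_cases hc : c = '$'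
      · rw [if_pos hc, ih]
        simp [keepAux, hc]
      · rw [if_neg hc]
        cases ig with
        | true =>
            rw [if_neg (by simp), ih]
            simp [keepAux, hc]
        | false =>
            rw [if_pos (by simp), ih]
            simp [keepAux, hc]

theorem go_eq (fuel : Nat) (l cur : List Char) (acc : List (List Char))
    (h : l.length ≤ fuel) :
    PySem.Chars.splitOn.go ['$'] fuel l cur acc
      = acc.reverse ++ (splitRec l).modifyHead (cur.reverse ++ ·) := by
  induction fuel generalizing l cur acc with
  | zero =>
      have : l = [] := List.length_eq_zero_iff.mp (Nat.le_zero.mp h)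
      subst this
      simp [PySem.Chars.splitOn.go, splitRec]
  | succ f ih =>
      cases l with
      | nil => simp [PySem.Chars.splitOn.go, splitRec]
      | cons c rest =>
          simp only [PySem.Chars.splitOn.go]
          by_cases hc : c = '$'
          · subst hc
            have hpre : List.isPrefixOf ['$'] ('$' :: rest) = true := by
              simp [List.isPrefixOf]
            rw [if_pos hpre]
            simp only [List.length_cons] at h
            rw [ih _ _ _ (by simpa using Nat.le_of_succ_le_succ h)]
            rw [show splitRec ('$' :: rest) = [] :: splitRec rest from by simp [splitRec]]
            simp only [List.length_cons, List.length_nil, List.drop_succ_cons, List.drop_zero,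
              List.reverse_cons, List.reverse_nil, List.nil_append, List.modifyHead_cons]
            cases hs : splitRec rest with
            | nil => simp [hs, List.modifyHead]
            | cons a as => simp [hs, List.modifyHead]
          · have hpre : List.isPrefixOf ['$'] (c :: rest) = false := by
              simp only [List.isPrefixOf, Bool.and_eq_false_iff]
              left
              exact beq_eq_false_iff_ne.mpr (fun h => hc h.symm)
            rw [if_neg (by simp [hpre])]
            simp only [List.length_cons] at h
            rw [ih _ _ _ (Nat.le_of_succ_le_succ h)]
            simp only [splitRec, if_neg hc]
            cases hs : splitRec rest with
            | nil => exact absurd hs (splitRec_ne_nil rest)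
            | cons a as => simp

theorem splitOn_eq_splitRec (l : List Char) :
    PySem.Chars.splitOn l ['$'] = splitRec l := by
  unfold PySem.Chars.splitOn
  rw [go_eq (l.length + 1) l [] [] (Nat.le_succ _)]
  cases hs : splitRec l with
  | nil => exact absurd hs (splitRec_ne_nil l)
  | cons a as => simp

theorem filterMap_evens {α : Type} (xs : List α) :
    (List.range ((xs.length + 1) / 2)).filterMap (fun k => xs[2 * k]?) = evens xs := by
  cases xs with
  | nil => simp [evens]
  | cons x rest =>
      cases rest with
      | nil => simp [List.range_succ, evens]
      | cons y rest' =>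
          have hlen : ((x :: y :: rest').length + 1) / 2 = (rest'.length + 1) / 2 + 1 := by
            simp [List.length_cons]; omega
          rw [hlen, List.range_succ_eq_map, List.filterMap_cons, List.filterMap_map]
          simp only [Nat.mul_zero, List.getElem?_cons_zero, Option.toList_some]
          have heq : (List.range ((rest'.length + 1) / 2)).filterMap
              ((fun k => (x :: y :: rest')[2 * k]?) ∘ Nat.succ)
              = (List.range ((rest'.length + 1) / 2)).filterMap (fun k => rest'[2 * k]?) := by
            apply List.filterMap_congr
            intro k _
            simp only [Function.comp]
            have h2 : 2 * Nat.succ k = (2 * k + 1) + 1 := by omega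
            rw [h2]
            simp
          rw [heq, filterMap_evens rest']
          simp [evens]

theorem sliceIndices_two (n : Nat) :
    PySem.List.sliceIndices n none none 2 = (0, (n : Int), 2) := by
  simp [PySem.List.sliceIndices]

theorem slice?_two {α : Type} (xs : List α) :
    PySem.List.slice? xs none none 2 = some (evens xs) := by
  unfold PySem.List.slice?
  rw [if_neg (by norm_num : ¬ (2:Int) = 0), sliceIndices_two]
  simp only
  rw [if_pos (by norm_num : (0:Int) < 2)]
  by_cases hl : (0:Int) < (xs.length : Int)
  · rw [if_pos hl]
    have hcount : (((xs.length : Int) - 0 + 2 - 1) / 2).toNat = (xs.length + 1) / 2 := by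
      omega
    rw [hcount]
    congr 1
    rw [← filterMap_evens xs]
    apply List.filterMap_congr
    intro k _
    congr 1
    omega
  · have hx : xs = [] := by
      cases xs with
      | nil => rfl
      | cons a as => simp at hl
    subst hx
    simp [evens]

theorem join_nil_flatten (ps : List (List Char)) :
    PySem.Chars.join [] ps = ps.flatten := by
  induction ps with
  | nil => simp [PySem.Chars.join, List.intercalate]
  | cons p ps ih =>
      cases ps with
      | nil => simp [PySem.Chars.join, List.intercalate]
      | cons q qs =>
          simp only [PySem.Chars.join, List.intercalate, List.intersperse] at *
          simp_all

theorem keepAux_eq_join (l : List Char) (ig : Bool) :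
    keepAux l ig = (evens (if ig then (splitRec l).tail else splitRec l)).flatten := by
  induction l generalizing ig with
  | nil => cases ig <;> simp [keepAux, splitRec, evens]
  | cons c rest ih =>
      by_cases hc : c = '$'
      · subst hc
        cases ig with
        | false =>
            rw [show keepAux ('$' :: rest) false = keepAux rest true from by simp [keepAux]]
            rw [ih true]
            simp [splitRec, evens_cons]
        | true =>
            rw [show keepAux ('$' :: rest) true = keepAux rest false from by simp [keepAux]]
            rw [ih false]
            simp [splitRec]
      · cases hs : splitRec rest with
        | nil => exact absurd hs (splitRec_ne_nil rest)
        | cons s0 S' =>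
            cases ig with
            | false =>
                simp only [keepAux, if_neg hc, Bool.not_false, if_true, splitRec,
                  Bool.false_eq_true, if_false, hs, List.modifyHead_cons]
                rw [ih false, hs]
                simp [evens_cons]
            | true =>
                simp only [keepAux, if_neg hc, Bool.not_true, Bool.false_eq_true,
                  if_false, splitRec, hs, List.modifyHead_cons]
                rw [ih true, hs]
                simp

-- ===== VERDICT (by name: the statement is the Claim_ definition above) =====
theorem ignore_hw_spec : Claim_equal_ignore_hw := by
  intro s _
  unfold Spec_ignore_hw ignore_hw ignore_hw_alt
  rw [splitOn_eq_splitRec, slice?_two]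
  simp only
  rw [foldlA, join_nil_flatten, keepAux_eq_join s.toList false]
  simp
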